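-- pv_equiv track=rewrite | github.com/Ryeoly/Algorithms_study | Implementation/thisiscodingtest_page_341.py | count
-- ===== SOURCE A (Python) =====
-- from copy import deepcopy
--
-- def count(arr, combi, two_values, n, m):  # 2가 퍼져서 0인 안전지대 count하는 함수
--     dx = [-1, 1, 0, 0]
--     dy = [0, 0, -1, 1]
--     # 파이썬 특성상 깊은 복사를 이용해야 한다.
--     temp = deepcopy(arr)
--     two_que = deepcopy(two_values)
--     # 벽 3개 설치
--     for i in combi:
--         temp[i[0]][i[1]] = 1
--
--     # 바이러스 전파 시뮬레이션
--     while two_que: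
--         col, row = two_que.pop()
--
--         for i in range(4):
--             n_c, n_r = col + dy[i], row + dx[i]
--             if 0 <= n_r < m and 0 <= n_c < n and temp[n_c][n_r] == 0:
--                 temp[n_c][n_r] = 2
--                 two_que.append((n_c, n_r))
--
--     # 안전 지대 카운트
--     result = 0
--     for i in range(n):
--         for j in range(m):
--             if temp[i][j] == 0:
--                 result += 1
--
--     return result
-- ===== SOURCE B (Python) =====
-- def count(arr, combi, two_values, n, m):
--     # copy the grid (don't mutate the caller's arr) and place the walls
--     grid = [list(row) for row in arr]
--     for a, b in combi:
--         grid[a][b] = 1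
--
--     # level-by-level (generation) virus expansion: the grid stays immutable,
--     # the infected cells live in a hash-set instead of being written back
--     infected = set()
--     frontier = list(two_values)
--     while frontier:
--         nxt = []
--         for c, r in frontier:
--             for nc, nr in ((c - 1, r), (c + 1, r), (c, r - 1), (c, r + 1)):
--                 if 0 <= nc < n and 0 <= nr < m and (nc, nr) not in infected and grid[nc][nr] == 0:
--                     infected.add((nc, nr))
--                     nxt.append((nc, nr))
--         frontier = nxt
--
--     # a safe cell is a zero cell that never got infected
--     return sum(1 for c in range(n) for r in range(m)
--                if grid[c][r] == 0 and (c, r) not in infected)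
-- ===== Notes on version B (the rewrite author's own statement) =====
-- stated objective: alternative
-- what changed: Replaces A's destructive pop/append stack flood-fill (which rewrites grid cells to 2 and then counts zeros) with a level-by-level frontier expansion over an immutable wall-placed grid that collects infected coordinates in a hash-set, counting safe cells as zero cells not in that set.
import Mathlib
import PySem

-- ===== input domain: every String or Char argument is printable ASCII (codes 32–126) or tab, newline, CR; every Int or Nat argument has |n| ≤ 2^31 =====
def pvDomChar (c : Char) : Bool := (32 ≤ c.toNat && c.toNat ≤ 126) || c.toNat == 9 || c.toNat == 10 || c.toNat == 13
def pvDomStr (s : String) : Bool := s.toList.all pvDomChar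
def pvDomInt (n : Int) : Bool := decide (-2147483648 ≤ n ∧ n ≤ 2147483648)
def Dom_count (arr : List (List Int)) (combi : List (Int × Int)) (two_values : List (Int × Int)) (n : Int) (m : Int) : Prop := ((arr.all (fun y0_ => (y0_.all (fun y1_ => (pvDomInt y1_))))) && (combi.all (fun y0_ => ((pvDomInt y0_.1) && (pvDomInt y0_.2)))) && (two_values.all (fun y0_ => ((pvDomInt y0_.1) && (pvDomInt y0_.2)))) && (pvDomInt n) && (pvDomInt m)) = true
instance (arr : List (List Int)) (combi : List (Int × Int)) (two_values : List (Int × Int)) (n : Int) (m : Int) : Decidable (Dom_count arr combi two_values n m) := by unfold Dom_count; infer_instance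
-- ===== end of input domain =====

-- B replaces A's destructive pop/append stack flood-fill (grid cells overwritten with 2, zeros
-- counted afterwards) by a level-by-level frontier expansion over the immutable wall-placed grid
-- that collects infected coordinates in a set; same return value (neither mutates its arguments).

-- ===== PORT A =====
-- Grid primitives for A's mutation of temp.
-- pvWrap/pvSetCell: Python assignment `g[a][b] = v` with negative-index wrap; exact where the
-- assignment succeeds (out-of-range = IndexError is excluded by Pre_count; there it returns g).
def pvWrap (i : Int) (len : Nat) : Int := if i < 0 then i + len else i

def pvSetCell (g : List (List Int)) (a b v : Int) : List (List Int) :=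
  let i := pvWrap a g.length
  if 0 ≤ i ∧ i < (g.length : Int) then
    let row := g.getD i.toNat []
    let j := pvWrap b row.length
    if 0 ≤ j ∧ j < (row.length : Int) then g.set i.toNat (row.set j.toNat v) else g
  else g

-- read `g[c][r]`: exact for the in-range non-negative indices reached under Pre_count
def pvVal (g : List (List Int)) (c r : Int) : Int := (g.getD c.toNat []).getD r.toNat 0

-- `g[c][r] == 0` as a bounds-safe test (default 1 ≠ 0): exact under Pre_count, where every
-- read the loops perform is in range; `false` out of range keeps the termination measure honest
def pvZero (g : List (List Int)) (c r : Int) : Bool :=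
  decide (0 ≤ c) && decide (0 ≤ r) && ((g.getD c.toNat []).getD r.toNat 1 == 0)

-- number of 0-cells: the termination measure of both spread loops
def pvZeros (g : List (List Int)) : Nat := (g.map (fun row => row.count 0)).sum

-- one direction step of A's spread loop (state = (temp, two_que))
def stepA (n m c r : Int) (s : List (List Int) × List (Int × Int)) (d : Int × Int) :
    List (List Int) × List (Int × Int) :=
  if 0 ≤ r + d.2 ∧ r + d.2 < m ∧ 0 ≤ c + d.1 ∧ c + d.1 < n ∧ pvZero s.1 (c + d.1) (r + d.2) = true then
    (pvSetCell s.1 (c + d.1) (r + d.2) 2, s.2 ++ [(c + d.1, r + d.2)])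
  else s

-- A's `while two_que:` loop: pop from the END, push discoveries, recurse.
-- `fuel` only makes the recursion structural: |two_que| + 2·(#0-cells) strictly decreases each
-- iteration (proved below), so the fuel floodA passes is never exhausted.
def floodAGo (n m : Int) : Nat → List (List Int) → List (Int × Int) → List (List Int)
  | 0, temp, _ => temp
  | fuel + 1, temp, que =>
    match PySem.List.pop? que with
    | none => temp
    | some (p, rest) =>
      -- dy.zip dx: the four (dy[i], dx[i]) pairs read by `for i in range(4)`
      let s := (([(0, -1), (0, 1), (-1, 0), (1, 0)] : List (Int × Int))).foldl
        (stepA n m p.1 p.2) (temp, rest)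
      floodAGo n m fuel s.1 s.2

def floodA (n m : Int) (temp : List (List Int)) (que : List (Int × Int)) : List (List Int) :=
  floodAGo n m (que.length + 2 * pvZeros temp + 1) temp que

def count (arr : List (List Int)) (combi : List (Int × Int)) (two_values : List (Int × Int)) (n : Int) (m : Int) : Int :=
  -- temp = deepcopy(arr); two_que = deepcopy(two_values); walls; spread; nested counting loops
  let temp := combi.foldl (fun t w => pvSetCell t w.1 w.2 1) arr
  let temp2 := floodA n m temp two_values
  (PySem.List.pyRange 0 n 1).foldl (fun res i =>
    (PySem.List.pyRange 0 m 1).foldl (fun res2 j =>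
      if pvVal temp2 i j = 0 then res2 + 1 else res2) res) 0

-- ===== PORT B =====
-- B never rewrites grid cells during the spread: one neighbour test/insert of B's inner loop
-- (state = (infected set, nxt)); the grid read `grid[nc][nr] == 0` with default 1 is exact under
-- Pre_count, where every read B performs is in range
def bStep (g : List (List Int)) (n m c r : Int)
    (s : PySem.Set (Int × Int) × List (Int × Int)) (d : Int × Int) :
    PySem.Set (Int × Int) × List (Int × Int) :=
  if 0 ≤ c + d.1 ∧ c + d.1 < n ∧ 0 ≤ r + d.2 ∧ r + d.2 < m ∧
      (c + d.1, r + d.2) ∉ s.1 ∧ (g.getD (c + d.1).toNat []).getD (r + d.2).toNat 1 = 0 then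
    (PySem.Set.add s.1 (c + d.1, r + d.2), s.2 ++ [(c + d.1, r + d.2)])
  else s

-- `for c, r in frontier: for nc, nr in …` — process one frontier cell's four neighbours
def bCell (g : List (List Int)) (n m : Int)
    (s : PySem.Set (Int × Int) × List (Int × Int)) (p : Int × Int) :
    PySem.Set (Int × Int) × List (Int × Int) :=
  (([(-1, 0), (1, 0), (0, -1), (0, 1)] : List (Int × Int))).foldl (bStep g n m p.1 p.2) s

-- B's `while frontier:` generation loop. `fuel` only makes the recursion structural: each
-- generation that produces a nonempty nxt infects at least one further 0-cell (proved below),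
-- so the fuel count_alt passes is never exhausted.
def floodBGen (g : List (List Int)) (n m : Int) :
    Nat → PySem.Set (Int × Int) → List (Int × Int) → PySem.Set (Int × Int)
  | 0, v, _ => v
  | fuel + 1, v, frontier =>
    match frontier with
    | [] => v
    | _ :: _ =>
      let s := frontier.foldl (bCell g n m) (v, [])
      floodBGen g n m fuel s.1 s.2

def count_alt (arr : List (List Int)) (combi : List (Int × Int)) (two_values : List (Int × Int)) (n : Int) (m : Int) : Int :=
  -- grid = [list(row) for row in arr]; walls; generation spread into `infected`; safe-cell sum
  let grid := combi.foldl (fun t w => pvSetCell t w.1 w.2 1) arr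
  let infected := floodBGen grid n m (pvZeros grid + 2) PySem.Set.empty two_values
  ((((PySem.List.pyRange 0 n 1).flatMap (fun c =>
      (PySem.List.pyRange 0 m 1).map (fun r => (c, r)))).filter
        (fun p => (pvVal grid p.1 p.2 == 0) && !(decide (p ∈ infected)))).length : Int)

-- ===== PRECONDITION & SPEC =====
-- wall assignment `temp[a][b] = 1` succeeds (Python negative-index wrap, no IndexError)
def pvWallOK (g : List (List Int)) (a b : Int) : Bool :=
  let i := pvWrap a g.length
  let row := g.getD i.toNat []
  let j := pvWrap b row.length
  decide (0 ≤ i ∧ i < (g.length : Int) ∧ 0 ≤ j ∧ j < (row.length : Int))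

-- Exactly the inputs where the Python A returns: every wall index is in range (after Python's
-- negative wrap), and — whenever both n and m are positive, i.e. some cell temp[i][j] is read —
-- the first n rows exist and each has at least m entries.
def Pre_count (arr : List (List Int)) (combi : List (Int × Int)) (two_values : List (Int × Int)) (n : Int) (m : Int) : Prop :=
  (∀ w ∈ combi, pvWallOK arr w.1 w.2 = true) ∧
  (0 < n → 0 < m →
    n ≤ (arr.length : Int) ∧ ∀ row ∈ arr.take n.toNat, m ≤ (row.length : Int))

instance (arr : List (List Int)) (combi : List (Int × Int)) (two_values : List (Int × Int)) (n : Int) (m : Int) : Decidable (Pre_count arr combi two_values n m) := by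
  unfold Pre_count; infer_instance

def pvWitness_count : List (List Int) × (List (Int × Int)) × (List (Int × Int)) × Int × Int :=
  ([[2, 0, 0], [0, 1, 0], [0, 0, 0]], [(1, 0)], [(0, 0)], 3, 3)

def Spec_count (arr : List (List Int)) (combi : List (Int × Int)) (two_values : List (Int × Int)) (n : Int) (m : Int) (out : Int) : Prop := out = count_alt arr combi two_values n m
instance (arr : List (List Int)) (combi : List (Int × Int)) (two_values : List (Int × Int)) (n : Int) (m : Int) (out : Int) : Decidable (Spec_count arr combi two_values n m out) := by unfold Spec_count; infer_instance

-- ===== CLAIM (what is proved, stated in full; the proofs are below) =====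
def Claim_equal_count : Prop := ∀ (arr : List (List Int)) (combi : List (Int × Int)) (two_values : List (Int × Int)) (n : Int) (m : Int), Dom_count arr combi two_values n m → Pre_count arr combi two_values n m → Spec_count arr combi two_values n m (count arr combi two_values n m)

-- ===== LEMMAS AND PROOFS =====

lemma pvZero_iff (g : List (List Int)) (c r : Int) :
    pvZero g c r = true ↔
      0 ≤ c ∧ 0 ≤ r ∧ r.toNat < (g.getD c.toNat []).length ∧ pvVal g c r = 0 := by
  unfold pvZero pvVal
  simp only [List.getD]
  rcases h : (g[c.toNat]?.getD [])[r.toNat]? with _ | v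
  · have hge := List.getElem?_eq_none_iff.mp h
    simp
    omega
  · have hlt : r.toNat < (g[c.toNat]?.getD []).length := by
      by_contra hx
      rw [List.getElem?_eq_none (by omega)] at h
      exact absurd h (by simp)
    simp [hlt]
    tauto

lemma pvZeros_row_lt (row : List Int) (j : Nat) (h : row[j]? = some 0) :
    (row.set j 2).count 0 < row.count 0 := by
  induction row generalizing j with
  | nil => simp at h
  | cons x xs ih =>
    cases j with
    | zero =>
      simp_all [List.count_cons]
    | succ j =>
      simp only [List.getElem?_cons_succ] at h
      have := ih j h
      simp only [List.set_cons_succ, List.count_cons]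
      split <;> omega

lemma pvZeros_set_lt_of_row (g : List (List Int)) (i : Nat) (row' : List Int)
    (hrow : row'.count 0 < (g.getD i []).count 0) (hi : i < g.length) :
    pvZeros (g.set i row') < pvZeros g := by
  induction g generalizing i with
  | nil => simp at hi
  | cons x xs ih =>
    cases i with
    | zero => simp_all [pvZeros]
    | succ i =>
      simp only [List.getD_cons_succ] at hrow
      have := ih i hrow (by simpa using hi)
      simp only [List.set_cons_succ, pvZeros, List.map_cons, List.sum_cons] at *
      omega

lemma pvZeros_set_lt (g : List (List Int)) (c r : Int) (h : pvZero g c r = true) :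
    pvZeros (pvSetCell g c r 2) < pvZeros g := by
  rw [pvZero_iff] at h
  obtain ⟨hc, hr, hlt, hval⟩ := h
  have hg : c.toNat < g.length := by
    by_contra hgl
    rw [List.getD_eq_default _ _ (by omega)] at hlt
    simp at hlt
  unfold pvSetCell pvWrap
  have h1 : ¬ (c < 0) := by omega
  have h2 : ¬ (r < 0) := by omega
  simp only [h1, if_false, h2]
  have hcc : (0:Int) ≤ c ∧ c < (g.length : Int) := ⟨hc, by omega⟩
  rw [if_pos hcc, if_pos ⟨hr, by omega⟩]
  apply pvZeros_set_lt_of_row _ _ _ _ hg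
  apply pvZeros_row_lt
  unfold pvVal at hval
  rw [List.getElem?_eq_getElem hlt]
  rw [List.getD_eq_getElem?_getD, List.getElem?_eq_getElem hlt] at hval
  simpa using hval


lemma stepA_measure (n m c r : Int) (s : List (List Int) × List (Int × Int)) (d : Int × Int) :
    (stepA n m c r s d).2.length + 2 * pvZeros (stepA n m c r s d).1 ≤
      s.2.length + 2 * pvZeros s.1 := by
  unfold stepA
  split
  · rename_i h
    have := pvZeros_set_lt s.1 _ _ h.2.2.2.2
    simp only [List.length_append, List.length_cons, List.length_nil]
    omega
  · exact le_refl _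

lemma foldl_stepA_measure (n m c r : Int) (ds : List (Int × Int)) :
    ∀ (t : List (List Int)) (q : List (Int × Int)),
      (ds.foldl (stepA n m c r) (t, q)).2.length + 2 * pvZeros (ds.foldl (stepA n m c r) (t, q)).1 ≤
        q.length + 2 * pvZeros t := by
  induction ds with
  | nil => intro t q; exact le_refl _
  | cons d ds ih =>
    intro t q
    calc _ ≤ (stepA n m c r (t, q) d).2.length + 2 * pvZeros (stepA n m c r (t, q) d).1 := by
            rw [List.foldl_cons, ← Prod.mk.eta (p := stepA n m c r (t, q) d)]
            exact ih _ _
    _ ≤ _ := stepA_measure n m c r (t, q) d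

lemma floodAGo_none (n m : Int) (fuel : Nat) (t : List (List Int)) (que : List (Int × Int))
    (h : PySem.List.pop? que = none) : floodAGo n m (fuel + 1) t que = t := by
  unfold floodAGo; rw [h]

lemma floodAGo_some (n m : Int) (fuel : Nat) (t : List (List Int)) (que : List (Int × Int))
    (p : Int × Int) (rest : List (Int × Int))
    (h : PySem.List.pop? que = some (p, rest)) :
    floodAGo n m (fuel + 1) t que =
      floodAGo n m fuel
        ((([(0, -1), (0, 1), (-1, 0), (1, 0)] : List (Int × Int))).foldl
          (stepA n m p.1 p.2) (t, rest)).1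
        ((([(0, -1), (0, 1), (-1, 0), (1, 0)] : List (Int × Int))).foldl
          (stepA n m p.1 p.2) (t, rest)).2 := by
  conv_lhs => unfold floodAGo; rw [h]

-- in-bounds test of the spread loops
def Inb (n m c r : Int) : Prop := 0 ≤ c ∧ c < n ∧ 0 ≤ r ∧ r < m

-- the four-neighbour relation both loops step along
def AdjS (c r c' r' : Int) : Prop :=
  (c' = c - 1 ∧ r' = r) ∨ (c' = c + 1 ∧ r' = r) ∨ (c' = c ∧ r' = r - 1) ∨ (c' = c ∧ r' = r + 1)

-- cells infected by the spread: reachable from a start through in-bounds 0-cells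
inductive Reach (g : List (List Int)) (starts : List (Int × Int)) (n m : Int) : Int → Int → Prop
  | base {c r c' r' : Int} : (c, r) ∈ starts → AdjS c r c' r' → Inb n m c' r' →
      pvVal g c' r' = 0 → Reach g starts n m c' r'
  | step {c r c' r' : Int} : Reach g starts n m c r → AdjS c r c' r' → Inb n m c' r' →
      pvVal g c' r' = 0 → Reach g starts n m c' r'

-- the part of Pre_count the spread needs: in-bounds cells really exist
def Good (g : List (List Int)) (n m : Int) : Prop :=
  0 < n → 0 < m →
    n ≤ (g.length : Int) ∧ ∀ i : Nat, (i : Int) < n → (m : Int) ≤ ((g.getD i []).length : Int)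

def Shape (t g : List (List Int)) : Prop :=
  t.length = g.length ∧ ∀ i : Nat, (t.getD i []).length = (g.getD i []).length

def Marked (t g : List (List Int)) (n m c r : Int) : Prop :=
  Inb n m c r ∧ pvVal t c r = 2 ∧ pvVal g c r = 0

-- loop invariant shared by both spread loops (g = grid after walls, starts = two_values):
-- shape is preserved; every changed cell is a reachable marked cell; queue entries are starts or
-- marked cells; and every start/marked cell no longer queued has all its 0-neighbours marked.
def SInv (g : List (List Int)) (starts : List (Int × Int)) (n m : Int)
    (t : List (List Int)) (que : List (Int × Int)) : Prop :=
  Shape t g ∧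
  (∀ c r : Int, 0 ≤ c → 0 ≤ r →
    pvVal t c r = pvVal g c r ∨
      (pvVal t c r = 2 ∧ pvVal g c r = 0 ∧ Inb n m c r ∧ Reach g starts n m c r)) ∧
  (∀ p ∈ que, p ∈ starts ∨ Marked t g n m p.1 p.2) ∧
  (∀ c r : Int, ((c, r) ∈ starts ∨ Marked t g n m c r) → (c, r) ∉ que →
    ∀ c' r' : Int, AdjS c r c' r' → Inb n m c' r' → pvVal g c' r' = 0 → pvVal t c' r' = 2)

-- what both loops produce: g with exactly the reachable cells turned to 2
def FinalGrid (g : List (List Int)) (starts : List (Int × Int)) (n m : Int)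
    (t : List (List Int)) : Prop :=
  Shape t g ∧
  ∀ c r : Int, 0 ≤ c → 0 ≤ r →
    (Reach g starts n m c r ∧ pvVal t c r = 2) ∨
      (¬ Reach g starts n m c r ∧ pvVal t c r = pvVal g c r)

-- zeta-expanded form of pvSetCell (definitional)
lemma pvSetCell_eq (g : List (List Int)) (a b v : Int) :
    pvSetCell g a b v =
      if 0 ≤ pvWrap a g.length ∧ pvWrap a g.length < (g.length : Int) then
        if 0 ≤ pvWrap b (g.getD (pvWrap a g.length).toNat []).length ∧
            pvWrap b (g.getD (pvWrap a g.length).toNat []).length <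
              ((g.getD (pvWrap a g.length).toNat []).length : Int) then
          g.set (pvWrap a g.length).toNat
            ((g.getD (pvWrap a g.length).toNat []).set
              (pvWrap b (g.getD (pvWrap a g.length).toNat []).length).toNat v)
        else g
      else g := rfl

lemma pvWrap_of_nonneg (i : Int) (len : Nat) (h : 0 ≤ i) : pvWrap i len = i := by
  unfold pvWrap; omega

lemma getD_eq_getElem_of_lt (t : List (List Int)) (i : Nat) (h : i < t.length) :
    t.getD i [] = t[i] := by
  rw [List.getD_eq_getElem?_getD, List.getElem?_eq_getElem h]; rfl

lemma getD_set_self {A : Type} (l : List A) (i : Nat) (x dflt : A) (h : i < l.length) :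
    (l.set i x).getD i dflt = x := by
  rw [List.getD_eq_getElem?_getD, List.getElem?_set_self (by simpa using h)]
  rfl

lemma getD_set_ne {A : Type} (l : List A) (i k : Nat) (x dflt : A) (h : i ≠ k) :
    (l.set i x).getD k dflt = l.getD k dflt := by
  rw [List.getD_eq_getElem?_getD, List.getElem?_set_ne h, ← List.getD_eq_getElem?_getD]

lemma shape_refl (g : List (List Int)) : Shape g g := ⟨rfl, fun _ => rfl⟩

lemma shape_trans {a b c : List (List Int)} (h1 : Shape a b) (h2 : Shape b c) : Shape a c :=
  ⟨h1.1.trans h2.1, fun i => (h1.2 i).trans (h2.2 i)⟩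

lemma shape_setCell (g : List (List Int)) (a b v : Int) : Shape (pvSetCell g a b v) g := by
  rw [pvSetCell_eq]
  split_ifs with h1 h2
  · refine ⟨by simp, fun k => ?_⟩
    have hI : (pvWrap a g.length).toNat < g.length := by omega
    by_cases hk : k = (pvWrap a g.length).toNat
    · subst hk
      rw [List.getD_eq_getElem?_getD, List.getElem?_set_self (by simpa using hI)]
      simp [getD_eq_getElem_of_lt g _ hI]
    · rw [List.getD_eq_getElem?_getD, List.getElem?_set_ne (fun he => hk he.symm),
        ← List.getD_eq_getElem?_getD]
  · exact shape_refl g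
  · exact shape_refl g

lemma pvVal_set_cases (g : List (List Int)) (a b c r : Int) :
    pvVal (pvSetCell g a b 2) c r = pvVal g c r ∨ pvVal (pvSetCell g a b 2) c r = 2 := by
  rw [pvSetCell_eq]
  split_ifs with h1 h2
  · have hI : (pvWrap a g.length).toNat < g.length := by omega
    have hJ : (pvWrap b (g.getD (pvWrap a g.length).toNat []).length).toNat <
        (g.getD (pvWrap a g.length).toNat []).length := by omega
    unfold pvVal
    by_cases hc : c.toNat = (pvWrap a g.length).toNat
    · rw [hc, getD_set_self _ _ _ _ hI]
      by_cases hr : r.toNat = (pvWrap b (g.getD (pvWrap a g.length).toNat []).length).toNat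
      · right
        rw [hr, getD_set_self _ _ _ _ hJ]
      · left
        rw [getD_set_ne _ _ _ _ _ (fun he => hr he.symm)]
    · left
      rw [getD_set_ne _ _ _ _ _ (fun he => hc he.symm)]
  · left; rfl
  · left; rfl

lemma pvVal_set2_persist (g : List (List Int)) (a b c r : Int) (h : pvVal g c r = 2) :
    pvVal (pvSetCell g a b 2) c r = 2 := by
  rcases pvVal_set_cases g a b c r with hh | hh <;> rw [hh]; exact h

lemma pvVal_set_other (g : List (List Int)) (a b v c r : Int) (ha : 0 ≤ a) (hb : 0 ≤ b)
    (hc : 0 ≤ c) (hr : 0 ≤ r) (hne : (c, r) ≠ (a, b)) :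
    pvVal (pvSetCell g a b v) c r = pvVal g c r := by
  rw [pvSetCell_eq]
  split_ifs with h1 h2
  · rw [pvWrap_of_nonneg a _ ha] at *
    unfold pvVal
    by_cases hcc : c.toNat = a.toNat
    · have hceq : c = a := by omega
      have hrb : r ≠ b := fun he => hne (by rw [hceq, he])
      rw [pvWrap_of_nonneg b _ hb] at *
      have hI : a.toNat < g.length := by omega
      rw [hcc, getD_set_self _ _ _ _ hI]
      rw [getD_set_ne _ _ _ _ _ (by omega)]
    · rw [getD_set_ne _ _ _ _ _ (fun he => hcc he.symm)]
  · rfl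
  · rfl

-- under Shape/Good, an in-bounds cell lies inside the actual lists
lemma inb_bounds (g gref : List (List Int)) (n m c r : Int) (hG : Good gref n m)
    (hS : Shape g gref) (hInb : Inb n m c r) :
    c.toNat < g.length ∧ r.toNat < (g.getD c.toNat []).length := by
  obtain ⟨hc0, hcn, hr0, hrm⟩ := hInb
  obtain ⟨hlen, hrow⟩ := hG (by omega) (by omega)
  have h1 : c.toNat < gref.length := by omega
  have h2 := hrow c.toNat (by omega)
  have hsl := hS.1
  refine ⟨by omega, ?_⟩
  have := hS.2 c.toNat
  omega

lemma pvVal_set_self (g gref : List (List Int)) (n m a b v : Int) (hG : Good gref n m)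
    (hS : Shape g gref) (hInb : Inb n m a b) :
    pvVal (pvSetCell g a b v) a b = v := by
  obtain ⟨hI, hJ⟩ := inb_bounds g gref n m a b hG hS hInb
  obtain ⟨ha0, _, hb0, _⟩ := hInb
  rw [pvSetCell_eq, pvWrap_of_nonneg a _ ha0]
  rw [if_pos ⟨ha0, by omega⟩, pvWrap_of_nonneg b _ hb0, if_pos ⟨hb0, by omega⟩]
  unfold pvVal
  rw [getD_set_self _ _ _ _ hI, getD_set_self _ _ _ _ hJ]

lemma pvZero_iff_val (g gref : List (List Int)) (n m c r : Int) (hG : Good gref n m)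
    (hS : Shape g gref) (hInb : Inb n m c r) :
    pvZero g c r = true ↔ pvVal g c r = 0 := by
  obtain ⟨hI, hJ⟩ := inb_bounds g gref n m c r hG hS hInb
  rw [pvZero_iff]
  exact ⟨fun h => h.2.2.2, fun h => ⟨hInb.1, hInb.2.2.1, hJ, h⟩⟩

lemma reach_inb (g : List (List Int)) (starts : List (Int × Int)) (n m c r : Int)
    (h : Reach g starts n m c r) : Inb n m c r ∧ pvVal g c r = 0 := by
  cases h with
  | base _ _ h3 h4 => exact ⟨h3, h4⟩
  | step _ _ h3 h4 => exact ⟨h3, h4⟩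

-- mid-fold invariant while the four neighbours of the popped cell (c, r) are being processed
def PInv (g : List (List Int)) (starts : List (Int × Int)) (n m c r : Int)
    (t : List (List Int)) (q : List (Int × Int)) : Prop :=
  Shape t g ∧
  (∀ a b : Int, 0 ≤ a → 0 ≤ b →
    pvVal t a b = pvVal g a b ∨
      (pvVal t a b = 2 ∧ pvVal g a b = 0 ∧ Inb n m a b ∧ Reach g starts n m a b)) ∧
  (∀ p ∈ q, p ∈ starts ∨ Marked t g n m p.1 p.2) ∧
  (∀ a b : Int, ((a, b) ∈ starts ∨ Marked t g n m a b) → (a, b) ∉ q → (a, b) ≠ (c, r) →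
    ∀ a' b' : Int, AdjS a b a' b' → Inb n m a' b' → pvVal g a' b' = 0 → pvVal t a' b' = 2)

lemma foldl_stepA_val2 (n m c r : Int) (ds : List (Int × Int)) :
    ∀ (t : List (List Int)) (q : List (Int × Int)) (x y : Int), pvVal t x y = 2 →
      pvVal (ds.foldl (stepA n m c r) (t, q)).1 x y = 2 := by
  induction ds with
  | nil => intro t q x y h; exact h
  | cons d ds ih =>
    intro t q x y h
    rw [List.foldl_cons, ← Prod.mk.eta (p := stepA n m c r (t, q) d)]
    apply ih
    unfold stepA
    split
    · exact pvVal_set2_persist _ _ _ _ _ h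
    · exact h

lemma stepA_true (n m c r : Int) (t : List (List Int)) (q : List (Int × Int)) (d : Int × Int)
    (h : 0 ≤ r + d.2 ∧ r + d.2 < m ∧ 0 ≤ c + d.1 ∧ c + d.1 < n ∧
      pvZero t (c + d.1) (r + d.2) = true) :
    stepA n m c r (t, q) d = (pvSetCell t (c + d.1) (r + d.2) 2, q ++ [(c + d.1, r + d.2)]) := by
  unfold stepA; rw [if_pos h]

lemma stepA_false (n m c r : Int) (t : List (List Int)) (q : List (Int × Int)) (d : Int × Int)
    (h : ¬ (0 ≤ r + d.2 ∧ r + d.2 < m ∧ 0 ≤ c + d.1 ∧ c + d.1 < n ∧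
      pvZero t (c + d.1) (r + d.2) = true)) :
    stepA n m c r (t, q) d = (t, q) := by
  unfold stepA; rw [if_neg h]

-- core lemma: processing the four neighbours of one popped cell preserves the invariant,
-- only appends newly marked neighbour cells, and leaves every processed neighbour non-0
lemma fold_core (g : List (List Int)) (starts : List (Int × Int)) (n m c r : Int)
    (hG : Good g n m) (hsrc : (c, r) ∈ starts ∨ Reach g starts n m c r) (ds : List (Int × Int)) :
    ∀ (t : List (List Int)) (q : List (Int × Int)),
      (∀ d ∈ ds, AdjS c r (c + d.1) (r + d.2)) → PInv g starts n m c r t q →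
      PInv g starts n m c r (ds.foldl (stepA n m c r) (t, q)).1 (ds.foldl (stepA n m c r) (t, q)).2 ∧
      (∀ p, p ∈ q → p ∈ (ds.foldl (stepA n m c r) (t, q)).2) ∧
      (∀ p, p ∈ (ds.foldl (stepA n m c r) (t, q)).2 →
        p ∈ q ∨ ∃ d ∈ ds, p = (c + d.1, r + d.2)) ∧
      (∀ d ∈ ds, Inb n m (c + d.1) (r + d.2) → pvVal g (c + d.1) (r + d.2) = 0 →
        pvVal (ds.foldl (stepA n m c r) (t, q)).1 (c + d.1) (r + d.2) = 2) := by
  induction ds with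
  | nil =>
    intro t q _ hP
    exact ⟨hP, fun p hp => hp, fun p hp => Or.inl hp, fun d hd => absurd hd (by simp)⟩
  | cons d ds ih =>
    intro t q hds hP
    obtain ⟨hSh, h2, h3, h4⟩ := hP
    have hadj : AdjS c r (c + d.1) (r + d.2) := hds d List.mem_cons_self
    by_cases hgd : 0 ≤ r + d.2 ∧ r + d.2 < m ∧ 0 ≤ c + d.1 ∧ c + d.1 < n ∧
        pvZero t (c + d.1) (r + d.2) = true
    · -- the neighbour is in bounds and 0: mark it and queue it
      rw [List.foldl_cons, stepA_true n m c r t q d hgd]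
      obtain ⟨hr0, hrm, hc0, hcn, hz⟩ := hgd
      have hInb : Inb n m (c + d.1) (r + d.2) := ⟨hc0, hcn, hr0, hrm⟩
      have hval0 : pvVal t (c + d.1) (r + d.2) = 0 :=
        (pvZero_iff_val t g n m _ _ hG hSh hInb).mp hz
      have hg0 : pvVal g (c + d.1) (r + d.2) = 0 := by
        rcases h2 (c + d.1) (r + d.2) hc0 hr0 with hh | hh
        · omega
        · omega
      have hreach : Reach g starts n m (c + d.1) (r + d.2) := by
        rcases hsrc with hs | hs
        · exact Reach.base hs hadj hInb hg0
        · exact Reach.step hs hadj hInb hg0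
      have hself : pvVal (pvSetCell t (c + d.1) (r + d.2) 2) (c + d.1) (r + d.2) = 2 :=
        pvVal_set_self t g n m _ _ 2 hG hSh hInb
      have hP' : PInv g starts n m c r (pvSetCell t (c + d.1) (r + d.2) 2)
          (q ++ [(c + d.1, r + d.2)]) := by
        refine ⟨shape_trans (shape_setCell _ _ _ _) hSh, ?_, ?_, ?_⟩
        · intro a b ha hb
          by_cases he : (a, b) = (c + d.1, r + d.2)
          · obtain ⟨he1, he2⟩ := Prod.mk.injEq .. ▸ he
            subst he1; subst he2
            exact Or.inr ⟨hself, hg0, hInb, hreach⟩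
          · rw [pvVal_set_other t _ _ 2 a b hc0 hr0 ha hb he]
            exact h2 a b ha hb
        · intro p hp
          rcases List.mem_append.mp hp with hp | hp
          · rcases h3 p hp with hh | hh
            · exact Or.inl hh
            · exact Or.inr ⟨hh.1, pvVal_set2_persist _ _ _ _ _ hh.2.1, hh.2.2⟩
          · have : p = (c + d.1, r + d.2) := by simpa using hp
            subst this
            exact Or.inr ⟨hInb, hself, hg0⟩
        · intro a b hab hnotin hne a' b' hadj' hinb' hgz'
          have hnq : (a, b) ∉ q := fun hh => hnotin (List.mem_append.mpr (Or.inl hh))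
          have hnnew : (a, b) ≠ (c + d.1, r + d.2) := fun hh => by
            exact hnotin (List.mem_append.mpr (Or.inr (by simp [hh])))
          have hab' : (a, b) ∈ starts ∨ Marked t g n m a b := by
            rcases hab with hh | hh
            · exact Or.inl hh
            · obtain ⟨m1, m2, m3⟩ := hh
              have he := pvVal_set_other t (c + d.1) (r + d.2) 2 a b hc0 hr0 m1.1 m1.2.2.1 hnnew
              exact Or.inr ⟨m1, he ▸ m2, m3⟩
          exact pvVal_set2_persist _ _ _ _ _ (h4 a b hab' hnq hne a' b' hadj' hinb' hgz')
      obtain ⟨ihP, ihSub, ihNew, ihHand⟩ :=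
        ih _ _ (fun d' hd' => hds d' (List.mem_cons_of_mem d hd')) hP'
      refine ⟨ihP, ?_, ?_, ?_⟩
      · intro p hp
        exact ihSub p (List.mem_append.mpr (Or.inl hp))
      · intro p hp
        rcases ihNew p hp with hh | hh
        · rcases List.mem_append.mp hh with hh | hh
          · exact Or.inl hh
          · exact Or.inr ⟨d, List.mem_cons_self, by simpa using hh⟩
        · obtain ⟨d', hd', he⟩ := hh
          exact Or.inr ⟨d', List.mem_cons_of_mem d hd', he⟩
      · intro d' hd' hinb' hgz'
        rcases List.mem_cons.mp hd' with hh | hh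
        · rw [hh]
          exact foldl_stepA_val2 n m c r ds _ _ _ _ hself
        · exact ihHand d' hh hinb' hgz'
    · -- guard failed: out of bounds or not 0; nothing changes
      rw [List.foldl_cons, stepA_false n m c r t q d hgd]
      obtain ⟨ihP, ihSub, ihNew, ihHand⟩ :=
        ih _ _ (fun d' hd' => hds d' (List.mem_cons_of_mem d hd')) ⟨hSh, h2, h3, h4⟩
      refine ⟨ihP, ihSub, ?_, ?_⟩
      · intro p hp
        rcases ihNew p hp with hh | hh
        · exact Or.inl hh
        · obtain ⟨d', hd', he⟩ := hh
          exact Or.inr ⟨d', List.mem_cons_of_mem d hd', he⟩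
      · intro d' hd' hinb' hgz'
        rcases List.mem_cons.mp hd' with hh | hh
        · rw [hh] at hinb' hgz' ⊢
          -- the guard can only have failed on the 0-test, so the cell is already 2
          have hz : pvZero t (c + d.1) (r + d.2) = false := by
            rcases Bool.eq_false_or_eq_true (pvZero t (c + d.1) (r + d.2)) with hb | hb
            · obtain ⟨a1, a2, a3, a4⟩ := hinb'
              exact absurd ⟨a3, a4, a1, a2, hb⟩ hgd
            · exact hb
          have hvne : pvVal t (c + d.1) (r + d.2) ≠ 0 := by
            intro hv
            rw [(pvZero_iff_val t g n m _ _ hG hSh hinb').mpr hv] at hz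
            simp at hz
          have hv2 : pvVal t (c + d.1) (r + d.2) = 2 := by
            rcases h2 (c + d.1) (r + d.2) hinb'.1 hinb'.2.2.1 with hh2 | hh2
            · omega
            · exact hh2.1
          exact foldl_stepA_val2 n m c r ds _ _ _ _ hv2
        · exact ihHand d' hh hinb' hgz'

lemma sInv_nil_reach_val2 (g : List (List Int)) (starts : List (Int × Int)) (n m : Int)
    (t : List (List Int)) (hInv : SInv g starts n m t []) :
    ∀ c r : Int, Reach g starts n m c r → pvVal t c r = 2 := by
  intro c r h
  induction h with
  | base hs hadj hinb hz =>
    exact hInv.2.2.2 _ _ (Or.inl hs) (by simp) _ _ hadj hinb hz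
  | step hr hadj hinb hz ih =>
    rename_i c0 r0 c1 r1
    obtain ⟨hinb0, hz0⟩ := reach_inb g starts n m c0 r0 (by assumption)
    exact hInv.2.2.2 c0 r0 (Or.inr ⟨hinb0, ih, hz0⟩) (by simp) _ _ hadj hinb hz

lemma sInv_nil_final (g : List (List Int)) (starts : List (Int × Int)) (n m : Int)
    (t : List (List Int)) (hInv : SInv g starts n m t []) : FinalGrid g starts n m t := by
  refine ⟨hInv.1, fun c r hc hr => ?_⟩
  by_cases h : Reach g starts n m c r
  · exact Or.inl ⟨h, sInv_nil_reach_val2 g starts n m t hInv c r h⟩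
  · refine Or.inr ⟨h, ?_⟩
    rcases hInv.2.1 c r hc hr with hh | hh
    · exact hh
    · exact absurd hh.2.2.2 h

lemma adjS_of_dirA (c r : Int) : ∀ d ∈ ([(0, -1), (0, 1), (-1, 0), (1, 0)] : List (Int × Int)),
    AdjS c r (c + d.1) (r + d.2) := by
  intro d hd
  unfold AdjS
  fin_cases hd <;> simp <;> omega

lemma adjS_of_dirB (c r : Int) : ∀ d ∈ ([(-1, 0), (1, 0), (0, -1), (0, 1)] : List (Int × Int)),
    AdjS c r (c + d.1) (r + d.2) := by
  intro d hd
  unfold AdjS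
  fin_cases hd <;> simp <;> omega

lemma adjS_mem_dirA (c r c' r' : Int) (h : AdjS c r c' r') :
    ∃ d ∈ ([(0, -1), (0, 1), (-1, 0), (1, 0)] : List (Int × Int)), (c', r') = (c + d.1, r + d.2) := by
  rcases h with ⟨h1, h2⟩ | ⟨h1, h2⟩ | ⟨h1, h2⟩ | ⟨h1, h2⟩
  · exact ⟨(-1, 0), by simp, by subst h1; subst h2; simp; all_goals omega⟩
  · exact ⟨(1, 0), by simp, by subst h1; subst h2; simp; all_goals omega⟩
  · exact ⟨(0, -1), by simp, by subst h1; subst h2; simp; all_goals omega⟩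
  · exact ⟨(0, 1), by simp, by subst h1; subst h2; simp; all_goals omega⟩

lemma adjS_mem_dirB (c r c' r' : Int) (h : AdjS c r c' r') :
    ∃ d ∈ ([(-1, 0), (1, 0), (0, -1), (0, 1)] : List (Int × Int)), (c', r') = (c + d.1, r + d.2) := by
  rcases h with ⟨h1, h2⟩ | ⟨h1, h2⟩ | ⟨h1, h2⟩ | ⟨h1, h2⟩
  · exact ⟨(-1, 0), by simp, by subst h1; subst h2; simp; all_goals omega⟩
  · exact ⟨(1, 0), by simp, by subst h1; subst h2; simp; all_goals omega⟩
  · exact ⟨(0, -1), by simp, by subst h1; subst h2; simp; all_goals omega⟩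
  · exact ⟨(0, 1), by simp, by subst h1; subst h2; simp; all_goals omega⟩

lemma marked_reach (g : List (List Int)) (starts : List (Int × Int)) (n m : Int)
    (t : List (List Int)) (hInv2 : ∀ a b : Int, 0 ≤ a → 0 ≤ b →
      pvVal t a b = pvVal g a b ∨
        (pvVal t a b = 2 ∧ pvVal g a b = 0 ∧ Inb n m a b ∧ Reach g starts n m a b))
    (c r : Int) (hM : Marked t g n m c r) : Reach g starts n m c r := by
  obtain ⟨hinb, ht2, hg0⟩ := hM
  rcases hInv2 c r hinb.1 hinb.2.2.1 with hh | hh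
  · omega
  · exact hh.2.2.2

lemma pop?_some_eq {α : Type} (que rest : List α) (p : α)
    (h : PySem.List.pop? que = some (p, rest)) : que = rest ++ [p] := by
  cases que using List.reverseRecOn with
  | nil => exact absurd h (by simp [show PySem.List.pop? ([] : List α) = none from rfl])
  | append_singleton ys y =>
    rw [PySem.List.pop?_last] at h
    obtain ⟨h1, h2⟩ : y = p ∧ ys = rest := by simpa using h
    rw [h1, h2]

lemma pop?_none_eq {α : Type} (que : List α) (h : PySem.List.pop? que = none) : que = [] := by
  cases que using List.reverseRecOn with
  | nil => rfl
  | append_singleton ys y => rw [PySem.List.pop?_last] at h; exact absurd h (by simp)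

-- rebuilding the full invariant after the four neighbours of the popped cell were processed
lemma rebuild_inv (g : List (List Int)) (starts : List (Int × Int)) (n m c r : Int)
    (t' : List (List Int)) (q' : List (Int × Int))
    (hP : PInv g starts n m c r t' q')
    (hHand : ∀ c' r' : Int, AdjS c r c' r' → Inb n m c' r' → pvVal g c' r' = 0 →
      pvVal t' c' r' = 2) :
    SInv g starts n m t' q' := by
  obtain ⟨hSh, h2, h3, h4⟩ := hP
  refine ⟨hSh, h2, h3, ?_⟩
  intro a b hab hnot a' b' hadj hinb hgz
  by_cases he : (a, b) = (c, r)
  · obtain ⟨he1, he2⟩ := Prod.mk.injEq .. ▸ he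
    subst he1; subst he2
    exact hHand a' b' hadj hinb hgz
  · exact h4 a b hab hnot he a' b' hadj hinb hgz

lemma floodAGo_final (g : List (List Int)) (starts : List (Int × Int)) (n m : Int)
    (hG : Good g n m) :
    ∀ (fuel : Nat) (t : List (List Int)) (que : List (Int × Int)),
      que.length + 2 * pvZeros t < fuel → SInv g starts n m t que →
      FinalGrid g starts n m (floodAGo n m fuel t que) := by
  intro fuel
  induction fuel with
  | zero => intro t que hf _; exact absurd hf (by omega)
  | succ fuel ih =>
    intro t que hf hInv
    cases hpop : PySem.List.pop? que with
    | none =>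
      rw [floodAGo_none n m fuel t que hpop]
      rw [pop?_none_eq que hpop] at hInv
      exact sInv_nil_final g starts n m t hInv
    | some pr =>
      obtain ⟨p, rest⟩ := pr
      rw [floodAGo_some n m fuel t que p rest hpop]
      have hlen : rest.length + 1 = que.length := PySem.List.length_of_pop?_eq_some _ hpop
      have hmeas := foldl_stepA_measure n m p.1 p.2 [(0, -1), (0, 1), (-1, 0), (1, 0)] t rest
      have hque : que = rest ++ [p] := pop?_some_eq que rest p hpop
      subst hque
      obtain ⟨hSh, h2, h3, h4⟩ := hInv
      have hpin : p ∈ rest ++ [p] := List.mem_append.mpr (Or.inr (by simp))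
      have hsrc : (p.1, p.2) ∈ starts ∨ Reach g starts n m p.1 p.2 := by
        rcases h3 p hpin with hh | hh
        · exact Or.inl (by simpa using hh)
        · exact Or.inr (marked_reach g starts n m t h2 p.1 p.2 hh)
      have hP : PInv g starts n m p.1 p.2 t rest := by
        refine ⟨hSh, h2, fun x hx => h3 x (List.mem_append.mpr (Or.inl hx)), ?_⟩
        intro a b hab hnot hne a' b' hadj hinb hgz
        refine h4 a b hab ?_ a' b' hadj hinb hgz
        intro hmem
        rcases List.mem_append.mp hmem with hh | hh
        · exact hnot hh
        · exact hne (by simpa using hh)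
      obtain ⟨hP', hSub, hNew, hHand⟩ :=
        fold_core g starts n m p.1 p.2 hG hsrc _ t rest (adjS_of_dirA p.1 p.2) hP
      apply ih _ _ (by omega)
      apply rebuild_inv g starts n m p.1 p.2 _ _ hP'
      intro c' r' hadj hinb hgz
      obtain ⟨d, hd, he⟩ := adjS_mem_dirA p.1 p.2 c' r' hadj
      obtain ⟨he1, he2⟩ := Prod.mk.injEq .. ▸ he
      rw [he1, he2]
      exact hHand d hd (he1 ▸ he2 ▸ hinb) (he1 ▸ he2 ▸ hgz)

lemma floodA_final (g : List (List Int)) (starts : List (Int × Int)) (n m : Int)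
    (hG : Good g n m) (t : List (List Int)) (que : List (Int × Int))
    (hInv : SInv g starts n m t que) : FinalGrid g starts n m (floodA n m t que) :=
  floodAGo_final g starts n m hG (que.length + 2 * pvZeros t + 1) t que
    (Nat.lt_succ_self _) hInv

-- ===== B-side abstraction: the infected set viewed as an overlay on the grid =====
-- ovl g v = g with every cell of v written to 2 (how A's temp relates to B's infected set)
def ovl (g : List (List Int)) (v : List (Int × Int)) : List (List Int) :=
  v.foldl (fun t p => pvSetCell t p.1 p.2 2) g

-- the invariant B's infected set keeps: distinct coordinates of real 0-cells
def Vz (g : List (List Int)) (v : List (Int × Int)) : Prop :=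
  v.Nodup ∧ ∀ q ∈ v, pvZero g q.1 q.2 = true

lemma ovl_nil (g : List (List Int)) : ovl g [] = g := rfl

lemma ovl_cons (g : List (List Int)) (q : Int × Int) (v : List (Int × Int)) :
    ovl g (q :: v) = ovl (pvSetCell g q.1 q.2 2) v := rfl

lemma ovl_append_singleton (g : List (List Int)) (v : List (Int × Int)) (p : Int × Int) :
    ovl g (v ++ [p]) = pvSetCell (ovl g v) p.1 p.2 2 := by
  unfold ovl; rw [List.foldl_append]; rfl

lemma shape_ovl (g : List (List Int)) (v : List (Int × Int)) : Shape (ovl g v) g := by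
  induction v generalizing g with
  | nil => exact shape_refl g
  | cons q v ih =>
    rw [ovl_cons]
    exact shape_trans (ih (pvSetCell g q.1 q.2 2)) (shape_setCell g q.1 q.2 2)

lemma set_self_of_pvZero (g : List (List Int)) (a b : Int) (h : pvZero g a b = true) :
    pvVal (pvSetCell g a b 2) a b = 2 := by
  rw [pvZero_iff] at h
  obtain ⟨ha, hb, hlt, _⟩ := h
  have hg : a.toNat < g.length := by
    by_contra hgl
    rw [List.getD_eq_default _ _ (by omega)] at hlt
    simp at hlt
  unfold pvSetCell pvWrap
  have h1 : ¬ (a < 0) := by omega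
  have h2 : ¬ (b < 0) := by omega
  simp only [h1, if_false, h2]
  rw [if_pos ⟨ha, by omega⟩, if_pos ⟨hb, by omega⟩]
  unfold pvVal
  rw [getD_set_self _ _ _ _ hg, getD_set_self _ _ _ _ hlt]

lemma pvZero_set_ne (g : List (List Int)) (a b w c r : Int) (ha : 0 ≤ a) (hb : 0 ≤ b)
    (hc : 0 ≤ c) (hr : 0 ≤ r) (hne : (c, r) ≠ (a, b)) :
    pvZero (pvSetCell g a b w) c r = pvZero g c r := by
  have hlen : ((pvSetCell g a b w).getD c.toNat []).length = (g.getD c.toNat []).length :=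
    (shape_setCell g a b w).2 c.toNat
  have hval := pvVal_set_other g a b w c r ha hb hc hr hne
  rw [Bool.eq_iff_iff, pvZero_iff, pvZero_iff, hlen, hval]

lemma nonneg_of_pvZero (g : List (List Int)) (c r : Int) (h : pvZero g c r = true) :
    0 ≤ c ∧ 0 ≤ r := by
  rw [pvZero_iff] at h; exact ⟨h.1, h.2.1⟩

lemma ovl_pvVal (v : List (Int × Int)) :
    ∀ (g : List (List Int)) (c r : Int), Vz g v → 0 ≤ c → 0 ≤ r →
      pvVal (ovl g v) c r = if (c, r) ∈ v then 2 else pvVal g c r := by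
  induction v with
  | nil => intro g c r _ _ _; simp [ovl_nil]
  | cons q v ih =>
    intro g c r hVz hc hr
    have hq : pvZero g q.1 q.2 = true := hVz.2 q List.mem_cons_self
    obtain ⟨hq1, hq2⟩ := nonneg_of_pvZero g q.1 q.2 hq
    have hqnot : q ∉ v := (List.nodup_cons.mp hVz.1).1
    have hVz' : Vz (pvSetCell g q.1 q.2 2) v := by
      refine ⟨(List.nodup_cons.mp hVz.1).2, fun q' hq' => ?_⟩
      have hz' : pvZero g q'.1 q'.2 = true := hVz.2 q' (List.mem_cons_of_mem q hq')
      obtain ⟨h1', h2'⟩ := nonneg_of_pvZero g q'.1 q'.2 hz'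
      have hne : (q'.1, q'.2) ≠ (q.1, q.2) := by
        intro he
        have : q' = q := by
          have e1 := congrArg Prod.fst he
          have e2 := congrArg Prod.snd he
          exact Prod.ext e1 e2
        exact hqnot (this ▸ hq')
      rw [pvZero_set_ne g q.1 q.2 2 q'.1 q'.2 hq1 hq2 h1' h2' hne]
      exact hz'
    rw [ovl_cons, ih _ c r hVz' hc hr]
    by_cases hm : (c, r) ∈ v
    · simp [hm]
    · rw [if_neg hm]
      by_cases he : (c, r) = q
      · have hce : c = q.1 := congrArg Prod.fst he
        have hre : r = q.2 := congrArg Prod.snd he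
        rw [if_pos (by simp [he]), hce, hre]
        exact set_self_of_pvZero g q.1 q.2 hq
      · rw [if_neg (by simp [he, hm]),
          pvVal_set_other g q.1 q.2 2 c r hq1 hq2 hc hr (fun hx => he (by rw [hx]))]

lemma ovl_pvZero (g : List (List Int)) (v : List (Int × Int)) (c r : Int)
    (hVz : Vz g v) (hc : 0 ≤ c) (hr : 0 ≤ r) :
    pvZero (ovl g v) c r = (!(decide ((c, r) ∈ v)) && pvZero g c r) := by
  have hlen : ((ovl g v).getD c.toNat []).length = (g.getD c.toNat []).length :=
    (shape_ovl g v).2 c.toNat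
  have hval := ovl_pvVal v g c r hVz hc hr
  by_cases hm : (c, r) ∈ v
  · rw [if_pos hm] at hval
    have : ¬ pvZero (ovl g v) c r = true := by
      intro ht
      have h := (pvZero_iff _ _ _).mp ht
      omega
    simp [hm, Bool.eq_false_iff.mpr this]
  · rw [if_neg hm] at hval
    simp only [hm, decide_false, Bool.not_false, Bool.true_and]
    rw [Bool.eq_iff_iff, pvZero_iff, pvZero_iff, hlen, hval]

lemma pvZero_of_nonneg (g : List (List Int)) (c r : Int) (hc : 0 ≤ c) (hr : 0 ≤ r) :
    pvZero g c r = ((g.getD c.toNat []).getD r.toNat 1 == 0) := by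
  simp [pvZero, hc, hr]

-- B's neighbour guard is exactly A's guard read through the overlay
lemma guard_iff (g : List (List Int)) (v : List (Int × Int)) (n m c r : Int) (d : Int × Int)
    (hVz : Vz g v) :
    (0 ≤ r + d.2 ∧ r + d.2 < m ∧ 0 ≤ c + d.1 ∧ c + d.1 < n ∧
        pvZero (ovl g v) (c + d.1) (r + d.2) = true) ↔
      (0 ≤ c + d.1 ∧ c + d.1 < n ∧ 0 ≤ r + d.2 ∧ r + d.2 < m ∧
        (c + d.1, r + d.2) ∉ v ∧ (g.getD (c + d.1).toNat []).getD (r + d.2).toNat 1 = 0) := by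
  constructor
  · rintro ⟨h1, h2, h3, h4, h5⟩
    rw [ovl_pvZero g v _ _ hVz h3 h1, pvZero_of_nonneg g _ _ h3 h1] at h5
    simp only [Bool.and_eq_true, Bool.not_eq_true', decide_eq_false_iff_not, beq_iff_eq] at h5
    exact ⟨h3, h4, h1, h2, h5.1, h5.2⟩
  · rintro ⟨h1, h2, h3, h4, h5, h6⟩
    refine ⟨h3, h4, h1, h2, ?_⟩
    rw [ovl_pvZero g v _ _ hVz h1 h3, pvZero_of_nonneg g _ _ h1 h3]
    simp only [Bool.and_eq_true, Bool.not_eq_true', decide_eq_false_iff_not, beq_iff_eq]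
    exact ⟨h5, h6⟩

-- one B step simulates one A step on the overlay (with the yet-unprocessed cells `rest` ahead)
lemma bStep_sim (g : List (List Int)) (n m c r : Int) (d : Int × Int)
    (v : List (Int × Int)) (nxt rest : List (Int × Int)) (hVz : Vz g v) :
    Vz g (bStep g n m c r (v, nxt) d).1 ∧
    ovl g (bStep g n m c r (v, nxt) d).1 = (stepA n m c r (ovl g v, rest ++ nxt) d).1 ∧
    rest ++ (bStep g n m c r (v, nxt) d).2 = (stepA n m c r (ovl g v, rest ++ nxt) d).2 := by
  by_cases hb : 0 ≤ c + d.1 ∧ c + d.1 < n ∧ 0 ≤ r + d.2 ∧ r + d.2 < m ∧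
      (c + d.1, r + d.2) ∉ v ∧ (g.getD (c + d.1).toNat []).getD (r + d.2).toNat 1 = 0
  · have ha := (guard_iff g v n m c r d hVz).mpr hb
    have hz : pvZero g (c + d.1) (r + d.2) = true := by
      rw [pvZero_of_nonneg g _ _ hb.1 hb.2.2.1]
      simp only [beq_iff_eq]
      exact hb.2.2.2.2.2
    unfold bStep stepA
    rw [if_pos hb, if_pos ha]
    simp only
    rw [PySem.Set.add_of_not_mem hb.2.2.2.2.1]
    refine ⟨⟨?_, ?_⟩, ovl_append_singleton g v _, by rw [List.append_assoc]⟩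
    · exact List.Nodup.append hVz.1 (List.nodup_singleton _)
        (by simpa using fun h => hb.2.2.2.2.1 h)
    · intro q hq
      rcases List.mem_append.mp hq with hh | hh
      · exact hVz.2 q hh
      · have : q = (c + d.1, r + d.2) := by simpa using hh
        subst this; exact hz
  · have ha := (Iff.not (guard_iff g v n m c r d hVz)).mpr hb
    unfold bStep stepA
    rw [if_neg hb, if_neg ha]
    exact ⟨hVz, rfl, rfl⟩

lemma dirfold_sim (g : List (List Int)) (n m c r : Int) (ds : List (Int × Int)) :
    ∀ (v : List (Int × Int)) (nxt rest : List (Int × Int)), Vz g v →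
      Vz g (ds.foldl (bStep g n m c r) (v, nxt)).1 ∧
      ovl g (ds.foldl (bStep g n m c r) (v, nxt)).1 =
        (ds.foldl (stepA n m c r) (ovl g v, rest ++ nxt)).1 ∧
      rest ++ (ds.foldl (bStep g n m c r) (v, nxt)).2 =
        (ds.foldl (stepA n m c r) (ovl g v, rest ++ nxt)).2 := by
  induction ds with
  | nil => intro v nxt rest hVz; exact ⟨hVz, rfl, rfl⟩
  | cons d ds ih =>
    intro v nxt rest hVz
    obtain ⟨hVz', hovl, hque⟩ := bStep_sim g n m c r d v nxt rest hVz
    rw [List.foldl_cons, List.foldl_cons,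
      ← Prod.mk.eta (p := bStep g n m c r (v, nxt) d),
      ← Prod.mk.eta (p := stepA n m c r (ovl g v, rest ++ nxt) d)]
    obtain ⟨i1, i2, i3⟩ := ih (bStep g n m c r (v, nxt) d).1 (bStep g n m c r (v, nxt) d).2 rest hVz'
    refine ⟨i1, ?_, ?_⟩
    · rw [i2, hovl, hque]
    · rw [i3, hovl, hque]

-- processing one whole generation preserves the invariant on the overlay and cannot grow
-- the pending work (each processed cell pays for everything it appends)
lemma gen_process (g : List (List Int)) (starts : List (Int × Int)) (n m : Int)
    (hG : Good g n m) (cells : List (Int × Int)) :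
    ∀ (v : List (Int × Int)) (nxt : List (Int × Int)),
      Vz g v → SInv g starts n m (ovl g v) (cells ++ nxt) →
      Vz g (cells.foldl (bCell g n m) (v, nxt)).1 ∧
      SInv g starts n m (ovl g (cells.foldl (bCell g n m) (v, nxt)).1)
        (cells.foldl (bCell g n m) (v, nxt)).2 ∧
      (cells.foldl (bCell g n m) (v, nxt)).2.length +
          2 * pvZeros (ovl g (cells.foldl (bCell g n m) (v, nxt)).1) ≤
        nxt.length + 2 * pvZeros (ovl g v) := by
  induction cells with
  | nil =>
    intro v nxt hVz hInv
    exact ⟨hVz, hInv, le_refl _⟩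
  | cons p cells ih =>
    intro v nxt hVz hInv
    obtain ⟨hVz₁, hovl, hque⟩ :=
      dirfold_sim g n m p.1 p.2 [(-1, 0), (1, 0), (0, -1), (0, 1)] v nxt cells hVz
    -- the A-side fold this generation step simulates
    obtain ⟨hSh, h2, h3, h4⟩ := hInv
    have hpin : p ∈ (p :: cells) ++ nxt := List.mem_append.mpr (Or.inl List.mem_cons_self)
    have hsrc : (p.1, p.2) ∈ starts ∨ Reach g starts n m p.1 p.2 := by
      rcases h3 p hpin with hh | hh
      · exact Or.inl (by simpa using hh)
      · exact Or.inr (marked_reach g starts n m (ovl g v) h2 p.1 p.2 hh)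
    have hP : PInv g starts n m p.1 p.2 (ovl g v) (cells ++ nxt) := by
      refine ⟨hSh, h2, fun x hx => h3 x (by
        rcases List.mem_append.mp hx with hh | hh
        · exact List.mem_append.mpr (Or.inl (List.mem_cons_of_mem p hh))
        · exact List.mem_append.mpr (Or.inr hh)), ?_⟩
      intro a b hab hnot hne a' b' hadj hinb hgz
      refine h4 a b hab ?_ a' b' hadj hinb hgz
      intro hmem
      rcases List.mem_append.mp hmem with hh | hh
      · rcases List.mem_cons.mp hh with hh' | hh'
        · exact hne (by simpa using hh')
        · exact hnot (List.mem_append.mpr (Or.inl hh'))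
      · exact hnot (List.mem_append.mpr (Or.inr hh))
    obtain ⟨hP', hSub, hNew, hHand⟩ :=
      fold_core g starts n m p.1 p.2 hG hsrc _ (ovl g v) (cells ++ nxt)
        (adjS_of_dirB p.1 p.2) hP
    have hSInv₁ : SInv g starts n m
        (ovl g ((([(-1, 0), (1, 0), (0, -1), (0, 1)] : List (Int × Int))).foldl
          (bStep g n m p.1 p.2) (v, nxt)).1)
        (cells ++ ((([(-1, 0), (1, 0), (0, -1), (0, 1)] : List (Int × Int))).foldl
          (bStep g n m p.1 p.2) (v, nxt)).2) := by
      rw [hovl, hque]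
      apply rebuild_inv g starts n m p.1 p.2 _ _ hP'
      intro c' r' hadj hinb hgz
      obtain ⟨d, hd, he⟩ := adjS_mem_dirB p.1 p.2 c' r' hadj
      obtain ⟨he1, he2⟩ := Prod.mk.injEq .. ▸ he
      rw [he1, he2]
      exact hHand d hd (he1 ▸ he2 ▸ hinb) (he1 ▸ he2 ▸ hgz)
    have hmeas := foldl_stepA_measure n m p.1 p.2 [(-1, 0), (1, 0), (0, -1), (0, 1)]
      (ovl g v) (cells ++ nxt)
    rw [← hovl, ← hque] at hmeas
    simp only [List.length_append] at hmeas
    -- apply the IH to the state after this cell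
    rw [List.foldl_cons]
    have hcell : bCell g n m (v, nxt) p =
        (([(-1, 0), (1, 0), (0, -1), (0, 1)] : List (Int × Int))).foldl
          (bStep g n m p.1 p.2) (v, nxt) := rfl
    rw [hcell, ← Prod.mk.eta (p := (([(-1, 0), (1, 0), (0, -1), (0, 1)] : List (Int × Int))).foldl
      (bStep g n m p.1 p.2) (v, nxt))]
    obtain ⟨j1, j2, j3⟩ := ih _ _ hVz₁ hSInv₁
    exact ⟨j1, j2, by omega⟩

lemma floodBGen_nil (g : List (List Int)) (n m : Int) (fuel : Nat) (v : PySem.Set (Int × Int)) :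
    floodBGen g n m (fuel + 1) v [] = v := rfl

lemma floodBGen_cons (g : List (List Int)) (n m : Int) (fuel : Nat) (v : PySem.Set (Int × Int))
    (p : Int × Int) (fr : List (Int × Int)) :
    floodBGen g n m (fuel + 1) v (p :: fr) =
      floodBGen g n m fuel ((p :: fr).foldl (bCell g n m) (v, [])).1
        ((p :: fr).foldl (bCell g n m) (v, [])).2 := rfl

lemma floodBGen_final (g : List (List Int)) (starts : List (Int × Int)) (n m : Int)
    (hG : Good g n m) :
    ∀ (fuel : Nat) (v : List (Int × Int)) (frontier : List (Int × Int)),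
      Vz g v → SInv g starts n m (ovl g v) frontier → pvZeros (ovl g v) + 2 ≤ fuel →
      Vz g (floodBGen g n m fuel v frontier) ∧
      FinalGrid g starts n m (ovl g (floodBGen g n m fuel v frontier)) := by
  intro fuel
  induction fuel with
  | zero => intro v frontier _ _ hf; exact absurd hf (by omega)
  | succ fuel ih =>
    intro v frontier hVz hInv hf
    cases frontier with
    | nil =>
      exact ⟨hVz, sInv_nil_final g starts n m (ovl g v) hInv⟩
    | cons p fr =>
      rw [floodBGen_cons]
      have hInv' : SInv g starts n m (ovl g v) ((p :: fr) ++ []) := by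
        rw [List.append_nil]; exact hInv
      obtain ⟨j1, j2, j3⟩ := gen_process g starts n m hG (p :: fr) v [] hVz hInv'
      simp only [List.length_nil, Nat.zero_add] at j3
      cases hout : ((p :: fr).foldl (bCell g n m) (v, [])).2 with
      | nil =>
        rw [hout] at j2
        cases fuel with
        | zero => omega
        | succ f =>
          rw [floodBGen_nil]
          exact ⟨j1, sInv_nil_final g starts n m _ j2⟩
      | cons x xs =>
        rw [hout] at j2 j3
        have : pvZeros (ovl g ((p :: fr).foldl (bCell g n m) (v, [])).1) + 2 ≤ fuel := by
          simp only [List.length_cons] at j3; omega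
        exact ih _ _ j1 j2 this

lemma grid_ext (t1 t2 g : List (List Int)) (h1 : Shape t1 g) (h2 : Shape t2 g)
    (hv : ∀ c r : Int, 0 ≤ c → 0 ≤ r → pvVal t1 c r = pvVal t2 c r) : t1 = t2 := by
  apply List.ext_getElem (h1.1.trans h2.1.symm)
  intro i hi1 hi2
  have hrow : t1[i].length = t2[i].length := by
    have e1 := h1.2 i
    have e2 := h2.2 i
    rw [getD_eq_getElem_of_lt t1 i hi1] at e1
    rw [getD_eq_getElem_of_lt t2 i hi2] at e2
    omega
  apply List.ext_getElem hrow
  intro j hj1 hj2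
  have := hv i j (by omega) (by omega)
  unfold pvVal at this
  rw [Int.toNat_natCast, Int.toNat_natCast, getD_eq_getElem_of_lt t1 i hi1,
    getD_eq_getElem_of_lt t2 i hi2, List.getD_eq_getElem?_getD, List.getD_eq_getElem?_getD,
    List.getElem?_eq_getElem hj1, List.getElem?_eq_getElem hj2] at this
  simpa using this

lemma final_unique (g : List (List Int)) (starts : List (Int × Int)) (n m : Int)
    (t1 t2 : List (List Int)) (hf1 : FinalGrid g starts n m t1)
    (hf2 : FinalGrid g starts n m t2) : t1 = t2 := by
  apply grid_ext t1 t2 g hf1.1 hf2.1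
  intro c r hc hr
  rcases hf1.2 c r hc hr with ⟨hre, he⟩ | ⟨hre, he⟩ <;>
    rcases hf2.2 c r hc hr with ⟨hre2, he2⟩ | ⟨hre2, he2⟩ <;>
      first | (exact absurd hre hre2) | (exact absurd hre2 hre) | (rw [he, he2])

lemma sInv_init (g : List (List Int)) (starts : List (Int × Int)) (n m : Int) :
    SInv g starts n m g starts := by
  refine ⟨shape_refl g, fun c r _ _ => Or.inl rfl, fun p hp => Or.inl hp, ?_⟩
  intro a b hab hnot a' b' _ _ _
  rcases hab with hh | hh
  · exact absurd hh hnot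
  · obtain ⟨_, hv2, hv0⟩ := hh
    omega

-- A's nested counting loops as a filtered-pairs length
lemma count_loops_eq (t : List (List Int)) (n m : Int) :
    (PySem.List.pyRange 0 n 1).foldl (fun res i =>
      (PySem.List.pyRange 0 m 1).foldl (fun res2 j =>
        if pvVal t i j = 0 then res2 + 1 else res2) res) 0 =
    ((((PySem.List.pyRange 0 n 1).flatMap (fun c =>
        (PySem.List.pyRange 0 m 1).map (fun r => (c, r)))).filter
          (fun p => pvVal t p.1 p.2 == 0)).length : Int) := by
  have inner : ∀ (L2 : List Int) (c : Int) (acc : Int),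
      L2.foldl (fun res2 j => if pvVal t c j = 0 then res2 + 1 else res2) acc =
        acc + ((L2.filter (fun j => pvVal t c j == 0)).length : Int) := by
    intro L2 c acc
    have := PySem.List.foldl_count_if (fun j => pvVal t c j == 0) L2 acc
    simp only [beq_iff_eq] at this
    rw [this, List.countP_eq_length_filter]
  have main : ∀ (L1 : List Int) (acc : Int),
      L1.foldl (fun res i =>
        (PySem.List.pyRange 0 m 1).foldl (fun res2 j =>
          if pvVal t i j = 0 then res2 + 1 else res2) res) acc =
      acc + (((L1.flatMap (fun c =>
        (PySem.List.pyRange 0 m 1).map (fun r => (c, r)))).filter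
          (fun p => pvVal t p.1 p.2 == 0)).length : Int) := by
    intro L1
    induction L1 with
    | nil => intro acc; simp
    | cons c L1 ih =>
      intro acc
      rw [List.foldl_cons, ih, inner _ c acc, List.flatMap_cons, List.filter_append,
        List.length_append, List.filter_map]
      push_cast
      have : (List.filter ((fun p => pvVal t p.1 p.2 == 0) ∘ fun r => (c, r))
          (PySem.List.pyRange 0 m 1)).length =
          (List.filter (fun j => pvVal t c j == 0) (PySem.List.pyRange 0 m 1)).length := by
        congr 1
      simp only [List.length_map, this]
      ring
  rw [main]
  ring

-- Pre_count gives Good for arr, and wall placement preserves Good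
lemma good_of_shape (t g : List (List Int)) (n m : Int) (hS : Shape t g) (hG : Good g n m) :
    Good t n m := by
  intro hn hm
  obtain ⟨hlen, hrow⟩ := hG hn hm
  have hsl := hS.1
  exact ⟨by omega, fun i hi => by rw [hS.2 i]; exact hrow i hi⟩

lemma shape_walls (arr : List (List Int)) (combi : List (Int × Int)) :
    Shape (combi.foldl (fun t w => pvSetCell t w.1 w.2 1) arr) arr := by
  induction combi generalizing arr with
  | nil => exact shape_refl arr
  | cons w combi ih =>
    rw [List.foldl_cons]
    exact shape_trans (ih (pvSetCell arr w.1 w.2 1)) (shape_setCell arr w.1 w.2 1)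

lemma good_of_pre (arr : List (List Int)) (combi : List (Int × Int))
    (two_values : List (Int × Int)) (n m : Int)
    (hPre : Pre_count arr combi two_values n m) : Good arr n m := by
  intro hn hm
  obtain ⟨hlen, hrow⟩ := hPre.2 hn hm
  refine ⟨hlen, fun i hi => ?_⟩
  have hilen : i < arr.length := by omega
  have hmem : arr[i] ∈ arr.take n.toNat := by
    have : i < n.toNat := by omega
    exact List.mem_take_iff_getElem.mpr ⟨i, by omega, by simp; all_goals omega⟩
  have := hrow arr[i] hmem
  rw [getD_eq_getElem_of_lt arr i hilen]
  omega

-- ===== VERDICT (by name: the statement is the Claim_ definition above) =====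
theorem count_spec : Claim_equal_count := by
  intro arr combi two_values n m hDom hPre
  show count arr combi two_values n m = count_alt arr combi two_values n m
  set g := combi.foldl (fun t w => pvSetCell t w.1 w.2 1) arr with hg
  have hGood : Good g n m :=
    good_of_shape _ arr n m (shape_walls arr combi) (good_of_pre arr combi two_values n m hPre)
  -- the final infected set of B
  set vfin := floodBGen g n m (pvZeros g + 2) PySem.Set.empty two_values with hv
  have hB : Vz g vfin ∧ FinalGrid g two_values n m (ovl g vfin) := by
    rw [hv]
    exact floodBGen_final g two_values n m hGood (pvZeros g + 2) PySem.Set.empty two_values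
      ⟨List.nodup_nil, by simp [PySem.Set.empty]⟩
      (sInv_init g two_values n m)
      (le_refl _)
  have hA : FinalGrid g two_values n m (floodA n m g two_values) :=
    floodA_final g two_values n m hGood g two_values (sInv_init g two_values n m)
  have heq : floodA n m g two_values = ovl g vfin :=
    final_unique g two_values n m _ _ hA hB.2
  have e1 : count arr combi two_values n m =
      (PySem.List.pyRange 0 n 1).foldl (fun res i =>
        (PySem.List.pyRange 0 m 1).foldl (fun res2 j =>
          if pvVal (floodA n m g two_values) i j = 0 then res2 + 1 else res2) res) 0 := rfl
  have e2 : count_alt arr combi two_values n m =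
      ((((PySem.List.pyRange 0 n 1).flatMap (fun c =>
          (PySem.List.pyRange 0 m 1).map (fun r => (c, r)))).filter
            (fun p => (pvVal g p.1 p.2 == 0) && !(decide (p ∈ vfin)))).length : Int) := rfl
  rw [e1, e2, count_loops_eq (floodA n m g two_values) n m]
  congr 2
  apply List.filter_congr
  intro p hp
  obtain ⟨c, hc, hp'⟩ := List.mem_flatMap.mp hp
  obtain ⟨r, hr, hpe⟩ := List.mem_map.mp hp'
  have hcn := (PySem.List.mem_pyRange_one).mp hc
  have hrm := (PySem.List.mem_pyRange_one).mp hr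
  have hc0 : 0 ≤ p.1 := by rw [← hpe]; exact hcn.1
  have hr0 : 0 ≤ p.2 := by rw [← hpe]; exact hrm.1
  rw [heq, ovl_pvVal vfin g p.1 p.2 hB.1 hc0 hr0]
  by_cases hm : (p.1, p.2) ∈ vfin
  · rw [if_pos hm]
    simp [show p ∈ vfin from by rwa [Prod.mk.eta] at hm]
  · rw [if_neg hm]
    simp [show p ∉ vfin from by rwa [Prod.mk.eta] at hm]
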